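-- pv_equiv track=rewrite | github.com/rodrigo1392/misc_tools | pymiscell/strings_tools.py | list_characters
-- ===== SOURCE A (Python) =====
-- import string
--
-- def list_characters(start_char='A', end_char='Z', capitalize=True):
--     """Generate alphabetical chars, with MS Excel columns names format.
--
--     List can be beyond Z, with AA, AB,... format.
--
--     Parameters
--     ----------
--     start_char : str
--         Char to start from.
--     end_char : str
--         Last char of list.
--     capitalize : bool, optional
--         If True, capitalize each char in output list. Default is True.
--
--     Returns
--     -------
--     List of str
--         List of generated chars.
--
--     Raises
--     ------
--     AssertionError
--         Bad data type in either `start_char` or `end_char`.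
--     """
--     assert isinstance(start_char, str) and isinstance(end_char, str),\
--         'Input data should be string type'
--
--     # Get list of ascii characters and with 'aa', 'ab', etc.
--     base_list = list(string.ascii_lowercase)
--     for i in base_list:
--         base_list = base_list + [i + c for c in string.ascii_lowercase]
--
--     # Extract chars of interest and capitalize.
--     output_list = base_list[base_list.index(start_char.lower()):
--                             base_list.index(end_char.lower()) + 1]
--     if capitalize is True:
--         output_list = [c.upper() for c in output_list]
--     return output_list
-- ===== SOURCE B (Python) =====
-- def list_characters(start_char='A', end_char='Z', capitalize=True):
--     """Generate Excel-style column labels from start_char to end_char.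
--
--     Computes label positions by bijective base-26 arithmetic instead of
--     searching a precomputed 702-element table.
--     """
--     assert isinstance(start_char, str) and isinstance(end_char, str),\
--         'Input data should be string type'
--
--     def label_to_index(label):
--         t = label.lower()
--         if 1 <= len(t) <= 2 and all('a' <= ch <= 'z' for ch in t):
--             if len(t) == 1:
--                 return ord(t) - 97
--             return 26 + 26 * (ord(t[0]) - 97) + (ord(t[1]) - 97)
--         raise ValueError(f"{t!r} is not in list")
--
--     def index_to_label(n):
--         if n < 26:
--             return chr(97 + n)
--         m = n - 26
--         return chr(97 + m // 26) + chr(97 + m % 26)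
--
--     first = label_to_index(start_char)
--     last = label_to_index(end_char)
--     output_list = [index_to_label(n) for n in range(first, last + 1)]
--     if capitalize is True:
--         output_list = [c.upper() for c in output_list]
--     return output_list
-- ===== Notes on version B (the rewrite author's own statement) =====
-- stated objective: simpler
-- what changed: B maps labels to 0-based positions by bijective base-26 arithmetic and generates the output directly from a range, instead of A's building a 702-element table each call and locating the endpoints with linear list.index searches.
import Mathlib
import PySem

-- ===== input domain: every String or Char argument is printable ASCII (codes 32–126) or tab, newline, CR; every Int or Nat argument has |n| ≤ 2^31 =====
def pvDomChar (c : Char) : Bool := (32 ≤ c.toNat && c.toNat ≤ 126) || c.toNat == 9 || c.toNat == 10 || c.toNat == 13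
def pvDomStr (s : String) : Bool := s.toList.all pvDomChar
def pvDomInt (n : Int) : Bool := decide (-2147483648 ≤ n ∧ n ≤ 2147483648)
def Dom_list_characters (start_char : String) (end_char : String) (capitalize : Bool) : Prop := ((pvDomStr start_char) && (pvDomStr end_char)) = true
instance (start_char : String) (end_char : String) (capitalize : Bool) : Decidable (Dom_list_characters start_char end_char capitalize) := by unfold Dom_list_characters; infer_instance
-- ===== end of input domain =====

-- B computes label positions by bijective base-26 arithmetic instead of building and
-- searching A's 702-element table; objective: simpler.

-- ===== PORT A =====
-- list(string.ascii_lowercase)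
def pvAscii : List Char :=
  ['a','b','c','d','e','f','g','h','i','j','k','l','m','n','o','p','q','r','s','t','u','v','w','x','y','z']

-- the loop 'for i in base_list: base_list = base_list + [i + c for c in ...]' iterates
-- over the ORIGINAL 26-element list object, so it is a fold over the initial letters
def pvBaseList : List String :=
  let base := pvAscii.map (fun c => String.ofList [c])
  base.foldl (fun acc i => acc ++ pvAscii.map (fun c => String.ofList (i.toList ++ [c]))) base

def list_characters (start_char : String) (end_char : String) (capitalize : Bool) : List String :=
  match PySem.List.index? pvBaseList (PySem.Str.lower start_char) with
  | none => []   -- unreachable under Pre_: Python raises ValueError here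
  | some s =>
    match PySem.List.index? pvBaseList (PySem.Str.lower end_char) with
    | none => []   -- unreachable under Pre_: Python raises ValueError here
    | some e =>
      let output_list := PySem.List.slice pvBaseList (some (s : Int)) (some ((e : Int) + 1))
      if capitalize then output_list.map PySem.Str.upper else output_list

-- ===== PORT B =====
def pvLabelToIndex? (label : String) : Option Nat :=
  match PySem.Chars.lower label.toList with
  | [c] => if 'a' ≤ c ∧ c ≤ 'z' then some (c.toNat - 97) else none
  | [c, d] =>
      if ('a' ≤ c ∧ c ≤ 'z') ∧ ('a' ≤ d ∧ d ≤ 'z') then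
        some (26 + 26 * (c.toNat - 97) + (d.toNat - 97))
      else none
  | _ => none   -- Python B raises ValueError here

def pvIndexToLabel (n : Int) : String :=
  if n < 26 then String.ofList [Char.ofNat (97 + n).toNat]
  else
    String.ofList [Char.ofNat (97 + PySem.Int.floordiv (n - 26) 26).toNat,
                   Char.ofNat (97 + PySem.Int.mod (n - 26) 26).toNat]

def list_characters_alt (start_char : String) (end_char : String) (capitalize : Bool) : List String :=
  match pvLabelToIndex? start_char, pvLabelToIndex? end_char with
  | some first, some last =>
      let output_list := (PySem.List.pyRange (first : Int) ((last : Int) + 1) 1).map pvIndexToLabel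
      if capitalize then output_list.map PySem.Str.upper else output_list
  | _, _ => []   -- unreachable under Pre_: Python raises ValueError here

-- ===== PRECONDITION & SPEC =====
def pvIsLabel (cs : List Char) : Bool :=
  match cs with
  | [c] => 'a' ≤ c && c ≤ 'z'
  | [c, d] => ('a' ≤ c && c ≤ 'z') && ('a' ≤ d && d ≤ 'z')
  | _ => false

-- Pre_ excludes exactly the inputs on which A raises ValueError (an argument whose
-- lowercasing is not a 1- or 2-letter a–z label, so list.index fails); B raises ValueError there too.
def Pre_list_characters (start_char : String) (end_char : String) (capitalize : Bool) : Prop :=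
  pvIsLabel (PySem.Chars.lower start_char.toList) = true ∧
  pvIsLabel (PySem.Chars.lower end_char.toList) = true
instance (start_char : String) (end_char : String) (capitalize : Bool) : Decidable (Pre_list_characters start_char end_char capitalize) := by unfold Pre_list_characters; infer_instance

def pvWitness_list_characters : String × String × Bool := ("y", "AB", false)

def Spec_list_characters (start_char : String) (end_char : String) (capitalize : Bool) (out : List String) : Prop := out = list_characters_alt start_char end_char capitalize
instance (start_char : String) (end_char : String) (capitalize : Bool) (out : List String) : Decidable (Spec_list_characters start_char end_char capitalize out) := by unfold Spec_list_characters; infer_instance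

-- ===== CLAIM (what is proved, stated in full; the proofs are below) =====
def Claim_equal_list_characters : Prop := ∀ (start_char : String) (end_char : String) (capitalize : Bool), Dom_list_characters start_char end_char capitalize → Pre_list_characters start_char end_char capitalize → Spec_list_characters start_char end_char capitalize (list_characters start_char end_char capitalize)

-- ===== LEMMAS AND PROOFS =====

-- proof-side closed form of the n-th entry of A's table
def pvLabel (n : Nat) : String :=
  if n < 26 then String.ofList [Char.ofNat (97 + n)]
  else String.ofList [Char.ofNat (97 + (n - 26) / 26), Char.ofNat (97 + (n - 26) % 26)]

-- proof-side left inverse of pvLabel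
def pvUn (s : String) : Nat :=
  match s.toList with
  | [c] => c.toNat - 97
  | [c, d] => 26 + 26 * (c.toNat - 97) + (d.toNat - 97)
  | _ => 0

set_option maxRecDepth 40000 in
lemma pvBaseList_eq : pvBaseList = (List.range 702).map pvLabel := by decide

set_option maxRecDepth 40000 in
lemma pvUn_pvLabel : ∀ n : Fin 702, pvUn (pvLabel n) = n := by decide

set_option maxRecDepth 40000 in
lemma pvIndexToLabel_eq : ∀ n : Fin 702, pvIndexToLabel ((n : Nat) : Int) = pvLabel n := by decide

lemma pvLabel_inj {m n : Nat} (hm : m < 702) (hn : n < 702) (h : pvLabel m = pvLabel n) : m = n := by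
  have h1 := pvUn_pvLabel ⟨m, hm⟩
  have h2 := pvUn_pvLabel ⟨n, hn⟩
  simp only [h] at h1
  simpa using h1.symm.trans h2

lemma index_base {n : Nat} (hn : n < 702) :
    PySem.List.index? pvBaseList (pvLabel n) = some n := by
  rw [pvBaseList_eq, PySem.List.index?_eq_some_iff]
  refine ⟨(List.range n).map pvLabel,
          ((List.range (702 - (n + 1))).map (fun k => pvLabel (n + 1 + k))), ?_, by simp, ?_⟩
  · rw [show 702 = n + (702 - (n + 1) + 1) by omega, List.range_add, List.range_succ_eq_map]
    simp only [List.map_map, List.map_append, Function.comp_def]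
    rw [show n + (702 - (n + 1) + 1) - (n + 1) = 702 - (n + 1) by omega]
    simp [Nat.add_comm, Nat.add_left_comm, Nat.succ_eq_add_one]
  · intro hmem
    obtain ⟨m, hm, hml⟩ := List.mem_map.mp hmem
    have hmlt : m < n := List.mem_range.mp hm
    exact absurd (pvLabel_inj (by omega) hn hml) (by omega)

lemma slice_eq {s e : Nat} (hs : s < 702) (he : e < 702) :
    PySem.List.slice pvBaseList (some (s : Int)) (some ((e : Int) + 1)) =
      (PySem.List.pyRange (s : Int) ((e : Int) + 1) 1).map pvIndexToLabel := by
  have hcast : ((e : Int) + 1) = ((e + 1 : Nat) : Int) := by push_cast; ring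
  rw [hcast, PySem.List.slice_natCast, PySem.List.pyRange_one, pvBaseList_eq]
  have hto : ((((e + 1 : Nat) : Int)) - (s : Int)).toNat = e + 1 - s := by omega
  rw [hto,
      show (702 : Nat) = s + (702 - s) by omega, List.range_add, List.map_append,
      List.drop_left' (by simp), ← List.map_take, ← List.map_take, List.take_range,
      show min (e + 1 - s) (702 - s) = e + 1 - s by omega,
      List.map_map, List.map_map]
  refine List.map_congr_left (fun k hk => ?_)
  have hklt : k < e + 1 - s := List.mem_range.mp hk
  have hlt : s + k < 702 := by omega
  have := pvIndexToLabel_eq ⟨s + k, hlt⟩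
  simp only [Function.comp_def]
  rw [show ((s : Int) + (k : Nat)) = (((s + k : Nat) : Nat) : Int) by push_cast; ring]
  exact this.symm

lemma label_data {t : String} (h : pvIsLabel (PySem.Chars.lower t.toList) = true) :
    ∃ n : Nat, n < 702 ∧ pvLabelToIndex? t = some n ∧ PySem.Str.lower t = pvLabel n := by
  have hlow : PySem.Str.lower t = String.ofList (PySem.Chars.lower t.toList) := rfl
  match hcs : PySem.Chars.lower t.toList with
  | [] => rw [hcs] at h; simp [pvIsLabel] at h
  | [c] =>
    rw [hcs] at h
    simp only [pvIsLabel, Bool.and_eq_true, decide_eq_true_eq] at h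
    obtain ⟨hc1, hc2⟩ := h
    have hb1 : 97 ≤ c.toNat := by simp only [Char.le_def, UInt32.le_iff_toNat_le] at hc1; simpa using hc1
    have hb2 : c.toNat ≤ 122 := by simp only [Char.le_def, UInt32.le_iff_toNat_le] at hc2; simpa using hc2
    refine ⟨c.toNat - 97, by omega, ?_, ?_⟩
    · simp [pvLabelToIndex?, hcs, hc1, hc2]
    · rw [hlow, hcs]
      simp only [pvLabel, if_pos (show c.toNat - 97 < 26 by omega)]
      rw [show 97 + (c.toNat - 97) = c.toNat by omega, Char.ofNat_toNat]
  | [c, d] =>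
    rw [hcs] at h
    simp only [pvIsLabel, Bool.and_eq_true, decide_eq_true_eq] at h
    obtain ⟨⟨hc1, hc2⟩, hd1, hd2⟩ := h
    have hb1 : 97 ≤ c.toNat := by simp only [Char.le_def, UInt32.le_iff_toNat_le] at hc1; simpa using hc1
    have hb2 : c.toNat ≤ 122 := by simp only [Char.le_def, UInt32.le_iff_toNat_le] at hc2; simpa using hc2
    have hb3 : 97 ≤ d.toNat := by simp only [Char.le_def, UInt32.le_iff_toNat_le] at hd1; simpa using hd1
    have hb4 : d.toNat ≤ 122 := by simp only [Char.le_def, UInt32.le_iff_toNat_le] at hd2; simpa using hd2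
    refine ⟨26 + 26 * (c.toNat - 97) + (d.toNat - 97), by omega, ?_, ?_⟩
    · simp [pvLabelToIndex?, hcs, hc1, hc2, hd1, hd2]
    · rw [hlow, hcs]
      simp only [pvLabel, if_neg (show ¬ (26 + 26 * (c.toNat - 97) + (d.toNat - 97) < 26) by omega)]
      rw [show 26 + 26 * (c.toNat - 97) + (d.toNat - 97) - 26 = 26 * (c.toNat - 97) + (d.toNat - 97) by omega,
          Nat.mul_add_div (by norm_num), Nat.mul_add_mod,
          Nat.div_eq_of_lt (by omega), Nat.mod_eq_of_lt (by omega), Nat.add_zero,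
          show 97 + (c.toNat - 97) = c.toNat by omega,
          show 97 + (d.toNat - 97) = d.toNat by omega,
          Char.ofNat_toNat, Char.ofNat_toNat]
  | _ :: _ :: _ :: _ => rw [hcs] at h; simp [pvIsLabel] at h

-- ===== VERDICT (by name: the statement is the Claim_ definition above) =====
theorem list_characters_spec : Claim_equal_list_characters := by
  intro start_char end_char capitalize _ hpre
  obtain ⟨h1, h2⟩ := hpre
  obtain ⟨ns, hns, hLs, hlowS⟩ := label_data h1
  obtain ⟨ne, hne, hLe, hlowE⟩ := label_data h2
  unfold Spec_list_characters list_characters list_characters_alt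
  rw [hLs, hLe, hlowS, hlowE, index_base hns, index_base hne]
  dsimp only
  rw [slice_eq hns hne]
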